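-- pv_equiv track=rewrite | github.com/Aaron-Cue/algoritmos-3 | Tp's/TP01/codigo01.py | cambio_aulas
-- ===== SOURCE A (Python) =====
-- def cambio_aulas(n, m, matriz):
--
--   long = n + m - 1
--
--   if long % 2 != 0:
--     return "NO"
--
--   # minimo y maximo posible hasta cada celda desde la casilla noroeste
--   min_s = [[0]*m for _ in range(n)]
--   max_s = [[0]*m for _ in range(n)]
--
--   for i in range(n):
--     for j in range(m):
--       valor = matriz[i][j]
--
--       if i == 0 and j == 0:
--         min_s[i][j] = valor # el valor de la celda
--         max_s[i][j] = valor # el valor de la celda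
--       else:
--         min_pos = []
--         max_pos = []
--         if i > 0:
--           min_pos.append(min_s[i-1][j]) # viene de arriba
--           max_pos.append(max_s[i-1][j])
--         if j > 0:
--           min_pos.append(min_s[i][j-1]) # viene de la izq
--           max_pos.append(max_s[i][j-1])
--         min_s[i][j] = min(min_pos) + valor  # min acumulado
--         max_s[i][j] = max(max_pos) + valor  # max acumulado
--
--   # si la suma 0 esta dentro del rango posible en la celda final, se puede
--   if min_s[n-1][m-1] <= 0 <= max_s[n-1][m-1]:
--     return "YES"
--   else:
--     return "NO"
-- ===== SOURCE B (Python) =====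
-- def cambio_aulas(n, m, matriz):
--   # Demand-driven memoized DFS from the target cell with an explicit stack
--   # (instead of A's bottom-up row-major double loop over two full tables).
--   if (n + m - 1) % 2 != 0:
--     return "NO"
--   memo = {}
--   stack = [(n - 1, m - 1)]
--   while stack:
--     i, j = stack[-1]
--     if (i, j) in memo:
--       stack.pop()
--       continue
--     pend = []
--     if i > 0 and (i - 1, j) not in memo:
--       pend.append((i - 1, j))
--     if j > 0 and (i, j - 1) not in memo:
--       pend.append((i, j - 1))
--     if pend:
--       stack.extend(pend)
--       continue
--     v = matriz[i][j]
--     if i == 0 and j == 0: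
--       memo[(i, j)] = (v, v)
--     else:
--       lows = ([memo[(i - 1, j)][0]] if i > 0 else []) + ([memo[(i, j - 1)][0]] if j > 0 else [])
--       highs = ([memo[(i - 1, j)][1]] if i > 0 else []) + ([memo[(i, j - 1)][1]] if j > 0 else [])
--       memo[(i, j)] = (v + min(lows), v + max(highs))
--     stack.pop()
--   lo, hi = memo[(n - 1, m - 1)]
--   return "YES" if lo <= 0 <= hi else "NO"
-- ===== Notes on version B (the rewrite author's own statement) =====
-- stated objective: alternative
-- what changed: Replaced A's bottom-up row-major double loop filling two preallocated n×m min/max tables with a demand-driven memoized DFS started at the target cell: an explicit stack plus a dict memo of (min,max) pairs, each cell resolved only after its predecessors, with no tables and no index loops.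
import Mathlib
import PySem

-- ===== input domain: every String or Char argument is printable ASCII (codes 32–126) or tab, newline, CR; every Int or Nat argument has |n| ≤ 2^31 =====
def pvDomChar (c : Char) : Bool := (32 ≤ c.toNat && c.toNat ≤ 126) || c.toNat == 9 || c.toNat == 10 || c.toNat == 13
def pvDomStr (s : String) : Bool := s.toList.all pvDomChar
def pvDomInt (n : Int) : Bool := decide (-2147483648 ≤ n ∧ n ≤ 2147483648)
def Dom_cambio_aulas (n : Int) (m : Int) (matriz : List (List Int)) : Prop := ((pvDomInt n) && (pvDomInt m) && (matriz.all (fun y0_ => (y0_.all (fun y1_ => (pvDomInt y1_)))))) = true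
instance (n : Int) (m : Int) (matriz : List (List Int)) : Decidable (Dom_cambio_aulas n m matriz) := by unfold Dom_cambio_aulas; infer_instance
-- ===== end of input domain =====

-- B replaces A's bottom-up row-major double loop over two preallocated n×m
-- tables with a demand-driven memoized DFS from the target cell: an explicit
-- stack plus a dict memo of (min,max) pairs, each cell resolved only after its
-- predecessors (alternative decomposition, no tables and no index loops).

-- ===== PORT A =====
-- min_s[i][j] = v  (indices nonnegative here; Python raises out of range, outside Pre_)
def pvSet2 (l : List (List Int)) (i j : Nat) (v : Int) : List (List Int) :=
  l.set i ((l.getD i []).set j v)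

-- l[i][j] for in-range nonnegative i, j (out-of-range raises in Python, outside Pre_)
def pvGet2 (l : List (List Int)) (i j : Int) : Int :=
  (l.getD i.toNat []).getD j.toNat 0

-- the body of A's inner loop (the assignments to min_s[i][j] / max_s[i][j])
def pvCellA (matriz : List (List Int)) (st : List (List Int) × List (List Int))
    (i j : Int) : List (List Int) × List (List Int) :=
  let ms := st.1
  let xs := st.2
  let valor := pvGet2 matriz i j
  if i = 0 ∧ j = 0 then
    (pvSet2 ms i.toNat j.toNat valor, pvSet2 xs i.toNat j.toNat valor)
  else
    let min_pos : List Int :=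
      (if i > 0 then [pvGet2 ms (i-1) j] else []) ++
      (if j > 0 then [pvGet2 ms i (j-1)] else [])
    let max_pos : List Int :=
      (if i > 0 then [pvGet2 xs (i-1) j] else []) ++
      (if j > 0 then [pvGet2 xs i (j-1)] else [])
    (pvSet2 ms i.toNat j.toNat (((PySem.List.min? min_pos (fun y => y)).getD 0) + valor),
     pvSet2 xs i.toNat j.toNat (((PySem.List.max? max_pos (fun y => y)).getD 0) + valor))

def cambio_aulas (n : Int) (m : Int) (matriz : List (List Int)) : String :=
  let long := n + m - 1
  if PySem.Int.mod long 2 ≠ 0 then "NO"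
  else
    let init : List (List Int) := List.replicate n.toNat (List.replicate m.toNat 0)
    let st := (PySem.List.pyRange 0 n 1).foldl (fun st i =>
        (PySem.List.pyRange 0 m 1).foldl (fun st j => pvCellA matriz st i j) st)
      (init, init)
    if pvGet2 st.1 (n-1) (m-1) ≤ 0 ∧ 0 ≤ pvGet2 st.2 (n-1) (m-1) then "YES" else "NO"

-- ===== PORT B =====
-- the memo key (i, j); stack indices are nonnegative inside Pre_
def pvKey (i j : Nat) : Int × Int := ((i : Int), (j : Int))

-- the pend list built by Source B's loop body (missing predecessors: up, then left)
def pvPend (memo : PySem.Dict (Int × Int) (Int × Int)) (i j : Nat) : List (Nat × Nat) :=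
  (if 0 < i ∧ memo.contains (pvKey (i - 1) j) = false then [(i - 1, j)] else []) ++
  (if 0 < j ∧ memo.contains (pvKey i (j - 1)) = false then [(i, j - 1)] else [])

-- the compute branch: v = matriz[i][j], then the base pair or min/max over the
-- predecessor pairs (memo[...] reads ported with getD: both keys are present here)
def pvResolve (matriz : List (List Int)) (memo : PySem.Dict (Int × Int) (Int × Int))
    (i j : Nat) : Int × Int :=
  let v := (matriz.getD i []).getD j 0
  if i = 0 ∧ j = 0 then (v, v)
  else
    let lows := (if 0 < i then [(memo.getD (pvKey (i - 1) j) (0, 0)).1] else []) ++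
                (if 0 < j then [(memo.getD (pvKey i (j - 1)) (0, 0)).1] else [])
    let highs := (if 0 < i then [(memo.getD (pvKey (i - 1) j) (0, 0)).2] else []) ++
                 (if 0 < j then [(memo.getD (pvKey i (j - 1)) (0, 0)).2] else [])
    (v + ((PySem.List.min? lows (fun y => y)).getD 0),
     v + ((PySem.List.max? highs (fun y => y)).getD 0))

-- Source B's while loop; the fuel only makes it total (proved sufficient inside Pre_);
-- stack head = Python's stack top, stack.extend(pend) = pend.reverse ++ stack
def pvLoop (matriz : List (List Int)) :
    Nat → PySem.Dict (Int × Int) (Int × Int) → List (Nat × Nat) →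
      PySem.Dict (Int × Int) (Int × Int)
  | 0, memo, _ => memo
  | _ + 1, memo, [] => memo
  | f + 1, memo, (i, j) :: rest =>
    if memo.contains (pvKey i j) then pvLoop matriz f memo rest
    else if pvPend memo i j ≠ [] then
      pvLoop matriz f memo ((pvPend memo i j).reverse ++ (i, j) :: rest)
    else
      pvLoop matriz f (memo.insert (pvKey i j) (pvResolve matriz memo i j)) rest

def cambio_aulas_alt (n : Int) (m : Int) (matriz : List (List Int)) : String :=
  if PySem.Int.mod (n + m - 1) 2 ≠ 0 then "NO"
  else
    let memo := pvLoop matriz (3 * (((n - 1).toNat + 1) * ((m - 1).toNat + 1)) + 2)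
      PySem.Dict.empty [((n - 1).toNat, (m - 1).toNat)]
    match memo.get? (pvKey (n - 1).toNat (m - 1).toNat) with
    | some (lo, hi) => if lo ≤ 0 ∧ 0 ≤ hi then "YES" else "NO"
    | none => "NO"   -- unreachable inside Pre_ (the fuel is proved sufficient); Python raises outside

-- ===== PRECONDITION & SPEC =====
-- Pre_ excludes exactly the inputs on which A raises (IndexError / min of empty
-- list): parity even but n < 1, m < 1, fewer than n rows, or one of the first
-- n rows shorter than m.
def Pre_cambio_aulas (n : Int) (m : Int) (matriz : List (List Int)) : Prop :=
  PySem.Int.mod (n + m - 1) 2 ≠ 0 ∨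
  (1 ≤ n ∧ 1 ≤ m ∧ n ≤ (matriz.length : Int) ∧
    ∀ row ∈ matriz.take n.toNat, m ≤ (row.length : Int))

instance (n : Int) (m : Int) (matriz : List (List Int)) : Decidable (Pre_cambio_aulas n m matriz) := by
  unfold Pre_cambio_aulas; infer_instance

def pvWitness_cambio_aulas : Int × Int × List (List Int) := (2, 3, [[1, 2, 3], [0, -6, 1]])

def Spec_cambio_aulas (n : Int) (m : Int) (matriz : List (List Int)) (out : String) : Prop := out = cambio_aulas_alt n m matriz
instance (n : Int) (m : Int) (matriz : List (List Int)) (out : String) : Decidable (Spec_cambio_aulas n m matriz out) := by unfold Spec_cambio_aulas; infer_instance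

-- ===== CLAIM (what is proved, stated in full; the proofs are below) =====
def Claim_equal_cambio_aulas : Prop := ∀ (n : Int) (m : Int) (matriz : List (List Int)), Dom_cambio_aulas n m matriz → Pre_cambio_aulas n m matriz → Spec_cambio_aulas n m matriz (cambio_aulas n m matriz)

-- ===== LEMMAS AND PROOFS =====

-- cell values of the grid (getD-view of matriz, as both ports read it)
def pvV (matriz : List (List Int)) (i j : Nat) : Int := (matriz.getD i []).getD j 0

-- the mathematical DP both programs compute: (min, max) accumulated path sum at (i, j)
def pvDP (v : Nat → Nat → Int) : Nat → Nat → Int × Int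
  | 0, 0 => (v 0 0, v 0 0)
  | 0, j+1 => ((pvDP v 0 j).1 + v 0 (j+1), (pvDP v 0 j).2 + v 0 (j+1))
  | i+1, 0 => ((pvDP v i 0).1 + v (i+1) 0, (pvDP v i 0).2 + v (i+1) 0)
  | i+1, j+1 => (min (pvDP v i (j+1)).1 (pvDP v (i+1) j).1 + v (i+1) (j+1),
                 max (pvDP v i (j+1)).2 (pvDP v (i+1) j).2 + v (i+1) (j+1))

-- completed row i of A's table (one side, selected by sel)
def pvRowF (v : Nat → Nat → Int) (m' : Nat) (sel : Int × Int → Int) (i : Nat) : List Int :=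
  (List.range m').map (fun j => sel (pvDP v i j))

-- row i of A's table after its first c cells have been filled
def pvPart (v : Nat → Nat → Int) (m' c : Nat) (sel : Int × Int → Int) (i : Nat) : List Int :=
  (List.range c).map (fun j => sel (pvDP v i j)) ++ List.replicate (m' - c) 0

-- A's table mid-row i: rows < i complete, row i filled up to column c, rest zero
def pvMid (v : Nat → Nat → Int) (m' n' i c : Nat) (sel : Int × Int → Int) : List (List Int) :=
  (List.range i).map (pvRowF v m' sel) ++
    pvPart v m' c sel i :: List.replicate (n' - i - 1) (List.replicate m' 0)

-- A's table after r full rows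
def pvTab (v : Nat → Nat → Int) (m' n' r : Nat) (sel : Int × Int → Int) : List (List Int) :=
  (List.range r).map (pvRowF v m' sel) ++ List.replicate (n' - r) (List.replicate m' 0)

-- shape lemmas for A's table -------------------------------------------------

theorem pvPart_zero (v : Nat → Nat → Int) (m' : Nat) (sel : Int × Int → Int) (i : Nat) :
    pvPart v m' 0 sel i = List.replicate m' 0 := by
  simp [pvPart]

theorem pvPart_full (v : Nat → Nat → Int) (m' : Nat) (sel : Int × Int → Int) (i : Nat) :
    pvPart v m' m' sel i = pvRowF v m' sel i := by
  simp [pvPart, pvRowF]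

theorem pvMid_zero (v : Nat → Nat → Int) (m' n' i : Nat) (sel : Int × Int → Int) (hi : i < n') :
    pvMid v m' n' i 0 sel = pvTab v m' n' i sel := by
  have h : n' - i = (n' - i - 1) + 1 := by omega
  unfold pvMid pvTab
  rw [pvPart_zero]
  congr 1
  conv_rhs => rw [h, List.replicate_succ]

theorem pvMid_full (v : Nat → Nat → Int) (m' n' i : Nat) (sel : Int × Int → Int) (_hi : i < n') :
    pvMid v m' n' i m' sel = pvTab v m' n' (i+1) sel := by
  have h : n' - i - 1 = n' - (i + 1) := by omega
  simp only [pvMid, pvTab, pvPart_full, h, List.range_succ, List.map_append, List.map_cons,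
    List.map_nil, List.append_assoc, List.singleton_append]

theorem pvMid_getD_self (v : Nat → Nat → Int) (m' n' i c : Nat) (sel : Int × Int → Int) :
    (pvMid v m' n' i c sel).getD i [] = pvPart v m' c sel i := by
  unfold pvMid
  rw [List.getD_append_right _ _ _ _ (by simp)]
  simp

theorem pvMid_getD_prev (v : Nat → Nat → Int) (m' n' i c : Nat) (sel : Int × Int → Int)
    (hi : 0 < i) :
    (pvMid v m' n' i c sel).getD (i-1) [] = pvRowF v m' sel (i-1) := by
  unfold pvMid
  rw [List.getD_append _ _ _ _ (by simp; omega)]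
  rw [List.getD_eq_getElem _ _ (by simp; omega)]
  simp

theorem pvRowF_getD (v : Nat → Nat → Int) (m' : Nat) (sel : Int × Int → Int) (i c : Nat)
    (hc : c < m') :
    (pvRowF v m' sel i).getD c 0 = sel (pvDP v i c) := by
  unfold pvRowF
  rw [List.getD_eq_getElem _ _ (by simp [hc])]
  simp

theorem pvPart_getD_lt (v : Nat → Nat → Int) (m' c : Nat) (sel : Int × Int → Int) (i t : Nat)
    (ht : t < c) :
    (pvPart v m' c sel i).getD t 0 = sel (pvDP v i t) := by
  unfold pvPart
  rw [List.getD_append _ _ _ _ (by simp [ht])]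
  rw [List.getD_eq_getElem _ _ (by simp [ht])]
  simp

theorem pvMid_set (v : Nat → Nat → Int) (m' n' i c : Nat) (sel : Int × Int → Int)
    (hc : c < m') :
    (pvMid v m' n' i c sel).set i ((pvPart v m' c sel i).set c (sel (pvDP v i c)))
      = pvMid v m' n' i (c+1) sel := by
  have hpart : (pvPart v m' c sel i).set c (sel (pvDP v i c)) = pvPart v m' (c+1) sel i := by
    unfold pvPart
    rw [List.set_append]
    rw [if_neg (by simp)]
    have h1 : m' - c = (m' - (c+1)) + 1 := by omega
    simp only [h1, List.replicate_succ, List.length_map, List.length_range, Nat.sub_self,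
      List.set_cons_zero, List.range_succ, List.map_append, List.map_cons, List.map_nil,
      List.append_assoc, List.singleton_append]
  unfold pvMid
  rw [List.set_append]
  rw [if_neg (by simp)]
  simp only [List.length_map, List.length_range, Nat.sub_self, List.set_cons_zero, hpart]

-- the cell body moves the mid-state one column forward --------------------------

theorem pvCellA_mid (matriz : List (List Int)) (m' n' i c : Nat)
    (hi : i < n') (hc : c < m') :
    pvCellA matriz
      (pvMid (pvV matriz) m' n' i c Prod.fst, pvMid (pvV matriz) m' n' i c Prod.snd)
      (i : Int) (c : Int)
    = (pvMid (pvV matriz) m' n' i (c+1) Prod.fst,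
       pvMid (pvV matriz) m' n' i (c+1) Prod.snd) := by
  set v := pvV matriz with hv
  have hvalor : pvGet2 matriz (i : Int) (c : Int) = v i c := by
    simp [pvGet2, pvV, hv]
  unfold pvCellA pvSet2
  simp only [hvalor, Int.toNat_natCast]
  by_cases h00 : (i : Int) = 0 ∧ (c : Int) = 0
  · rw [if_pos h00]
    obtain ⟨hi0, hc0⟩ := h00
    have hi0' : i = 0 := by exact_mod_cast hi0
    have hc0' : c = 0 := by exact_mod_cast hc0
    subst hi0'; subst hc0'
    rw [pvMid_getD_self, pvMid_getD_self, Prod.mk.injEq]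
    constructor
    · have h := pvMid_set v m' n' 0 0 Prod.fst hc
      simpa [pvDP] using h
    · have h := pvMid_set v m' n' 0 0 Prod.snd hc
      simpa [pvDP] using h
  · rw [if_neg h00]
    rw [pvMid_getD_self, pvMid_getD_self]
    rcases i with _ | i' <;> rcases c with _ | c'
    · exact absurd ⟨rfl, rfl⟩ h00
    · -- i = 0, c = c'+1 : only the left neighbour
      have hig : ¬ ((0 : Int) > 0) := by omega
      have hcg : ((c' + 1 : Nat) : Int) > 0 := by positivity
      have hsub : ((c' + 1 : Nat) : Int) - 1 = (c' : Nat) := by push_cast; ring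
      simp only [Nat.cast_zero, hig, if_pos hcg, hsub, List.nil_append, if_false]
      simp only [pvGet2, Int.toNat_natCast, Int.toNat_zero, pvMid_getD_self]
      rw [pvPart_getD_lt v m' (c'+1) Prod.fst 0 c' (by omega),
          pvPart_getD_lt v m' (c'+1) Prod.snd 0 c' (by omega)]
      simp only [PySem.List.min?_id_cons, PySem.List.max?_id_cons, List.foldl_nil,
        Option.getD_some]
      have emin : Prod.fst (pvDP v 0 c') + v 0 (c'+1) = Prod.fst (pvDP v 0 (c'+1)) := by
        simp [pvDP]
      have emax : Prod.snd (pvDP v 0 c') + v 0 (c'+1) = Prod.snd (pvDP v 0 (c'+1)) := by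
        simp [pvDP]
      rw [emin, emax, Prod.mk.injEq]
      exact ⟨pvMid_set v m' n' 0 (c'+1) _ hc, pvMid_set v m' n' 0 (c'+1) _ hc⟩
    · -- i = i'+1, c = 0 : only the upper neighbour
      have hig : ((i' + 1 : Nat) : Int) > 0 := by positivity
      have hcg : ¬ ((0 : Int) > 0) := by omega
      have hsub : ((i' + 1 : Nat) : Int) - 1 = (i' : Nat) := by push_cast; ring
      simp only [Nat.cast_zero, if_pos hig, hcg, hsub, List.append_nil, if_false]
      simp only [pvGet2, Int.toNat_natCast, Int.toNat_zero]
      have hp1 := pvMid_getD_prev v m' n' (i'+1) 0 Prod.fst (by omega)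
      have hp2 := pvMid_getD_prev v m' n' (i'+1) 0 Prod.snd (by omega)
      simp only [Nat.add_sub_cancel] at hp1 hp2
      rw [hp1, hp2]
      rw [pvRowF_getD v m' Prod.fst i' 0 (by omega), pvRowF_getD v m' Prod.snd i' 0 (by omega)]
      simp only [PySem.List.min?_id_cons, PySem.List.max?_id_cons, List.foldl_nil,
        Option.getD_some]
      have emin : Prod.fst (pvDP v i' 0) + v (i'+1) 0 = Prod.fst (pvDP v (i'+1) 0) := by
        simp [pvDP]
      have emax : Prod.snd (pvDP v i' 0) + v (i'+1) 0 = Prod.snd (pvDP v (i'+1) 0) := by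
        simp [pvDP]
      rw [emin, emax, Prod.mk.injEq]
      exact ⟨pvMid_set v m' n' (i'+1) 0 _ hc, pvMid_set v m' n' (i'+1) 0 _ hc⟩
    · -- i = i'+1, c = c'+1 : both neighbours
      have hig : ((i' + 1 : Nat) : Int) > 0 := by positivity
      have hcg : ((c' + 1 : Nat) : Int) > 0 := by positivity
      have hsubi : ((i' + 1 : Nat) : Int) - 1 = (i' : Nat) := by push_cast; ring
      have hsubc : ((c' + 1 : Nat) : Int) - 1 = (c' : Nat) := by push_cast; ring
      simp only [if_pos hig, if_pos hcg, hsubi, hsubc]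
      simp only [pvGet2, Int.toNat_natCast, pvMid_getD_self]
      have hp1 := pvMid_getD_prev v m' n' (i'+1) (c'+1) Prod.fst (by omega)
      have hp2 := pvMid_getD_prev v m' n' (i'+1) (c'+1) Prod.snd (by omega)
      simp only [Nat.add_sub_cancel] at hp1 hp2
      rw [hp1, hp2]
      rw [pvRowF_getD v m' Prod.fst i' (c'+1) (by omega),
          pvRowF_getD v m' Prod.snd i' (c'+1) (by omega)]
      rw [pvPart_getD_lt v m' (c'+1) Prod.fst (i'+1) c' (by omega),
          pvPart_getD_lt v m' (c'+1) Prod.snd (i'+1) c' (by omega)]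
      simp only [List.cons_append, List.nil_append, PySem.List.min?_id_cons,
        PySem.List.max?_id_cons, List.foldl_cons, List.foldl_nil, Option.getD_some]
      have emin : min (Prod.fst (pvDP v i' (c'+1))) (Prod.fst (pvDP v (i'+1) c')) + v (i'+1) (c'+1)
          = Prod.fst (pvDP v (i'+1) (c'+1)) := by simp [pvDP]
      have emax : max (Prod.snd (pvDP v i' (c'+1))) (Prod.snd (pvDP v (i'+1) c')) + v (i'+1) (c'+1)
          = Prod.snd (pvDP v (i'+1) (c'+1)) := by simp [pvDP]
      rw [emin, emax, Prod.mk.injEq]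
      exact ⟨pvMid_set v m' n' (i'+1) (c'+1) _ hc, pvMid_set v m' n' (i'+1) (c'+1) _ hc⟩

-- inner loop: fills row i ------------------------------------------------------

theorem A_inner (matriz : List (List Int)) (m' n' i : Nat) (hi : i < n') :
    ∀ c, c ≤ m' →
      (List.range c).foldl (fun st (j : Nat) => pvCellA matriz st (i : Int) (j : Int))
        (pvMid (pvV matriz) m' n' i 0 Prod.fst, pvMid (pvV matriz) m' n' i 0 Prod.snd)
      = (pvMid (pvV matriz) m' n' i c Prod.fst, pvMid (pvV matriz) m' n' i c Prod.snd) := by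
  intro c
  induction c with
  | zero => intro _; simp
  | succ c ih =>
    intro hc
    rw [List.range_succ, List.foldl_append, ih (by omega)]
    simpa using pvCellA_mid matriz m' n' i c hi (by omega)

-- outer loop: fills the first r rows ------------------------------------------

theorem A_outer (matriz : List (List Int)) (m' n' : Nat) :
    ∀ r, r ≤ n' →
      (List.range r).foldl (fun st (i : Nat) =>
          (List.range m').foldl (fun st (j : Nat) => pvCellA matriz st (i : Int) (j : Int)) st)
        (pvTab (pvV matriz) m' n' 0 Prod.fst, pvTab (pvV matriz) m' n' 0 Prod.snd)
      = (pvTab (pvV matriz) m' n' r Prod.fst, pvTab (pvV matriz) m' n' r Prod.snd) := by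
  intro r
  induction r with
  | zero => intro _; simp
  | succ r ih =>
    intro hr
    rw [List.range_succ, List.foldl_append, ih (by omega)]
    have hz := pvMid_zero (pvV matriz) m' n' r Prod.fst (by omega)
    have hz' := pvMid_zero (pvV matriz) m' n' r Prod.snd (by omega)
    have hf := pvMid_full (pvV matriz) m' n' r Prod.fst (by omega)
    have hf' := pvMid_full (pvV matriz) m' n' r Prod.snd (by omega)
    simp only [List.foldl_cons, List.foldl_nil]
    rw [← hz, ← hz', A_inner matriz m' n' r (by omega) m' (le_refl _), hf, hf']

-- A's result characterisation --------------------------------------------------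

theorem A_result (n m : Int) (matriz : List (List Int)) (hn : 1 ≤ n) (hm : 1 ≤ m)
    (hpar : PySem.Int.mod (n + m - 1) 2 = 0) :
    cambio_aulas n m matriz =
      if (pvDP (pvV matriz) (n.toNat - 1) (m.toNat - 1)).1 ≤ 0 ∧
         0 ≤ (pvDP (pvV matriz) (n.toNat - 1) (m.toNat - 1)).2
      then "YES" else "NO" := by
  unfold cambio_aulas
  simp only [hpar, ne_eq, not_true_eq_false, if_false]
  rw [PySem.List.pyRange_one 0 n, PySem.List.pyRange_one 0 m]
  simp only [sub_zero, List.foldl_map, zero_add]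
  have hinit : (List.replicate n.toNat (List.replicate m.toNat 0),
        List.replicate n.toNat (List.replicate m.toNat 0))
      = (pvTab (pvV matriz) m.toNat n.toNat 0 Prod.fst,
         pvTab (pvV matriz) m.toNat n.toNat 0 Prod.snd) := by simp [pvTab]
  rw [hinit]
  rw [A_outer matriz m.toNat n.toNat n.toNat (le_refl _)]
  have hn1 : (n - 1).toNat = n.toNat - 1 := by omega
  have hm1 : (m - 1).toNat = m.toNat - 1 := by omega
  have hget : ∀ sel, pvGet2 (pvTab (pvV matriz) m.toNat n.toNat n.toNat sel) (n-1) (m-1)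
      = sel (pvDP (pvV matriz) (n.toNat - 1) (m.toNat - 1)) := by
    intro sel
    have htab : pvTab (pvV matriz) m.toNat n.toNat n.toNat sel
        = (List.range n.toNat).map (pvRowF (pvV matriz) m.toNat sel) := by
      simp [pvTab]
    have hout : ((List.range n.toNat).map (pvRowF (pvV matriz) m.toNat sel)).getD
        (n.toNat - 1) [] = pvRowF (pvV matriz) m.toNat sel (n.toNat - 1) := by
      rw [List.getD_eq_getElem _ _ (by simp; omega)]
      simp only [List.getElem_map, List.getElem_range]
    unfold pvGet2
    rw [hn1, hm1, htab, hout]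
    exact pvRowF_getD _ _ _ _ _ (by omega)
  rw [hget, hget]

-- B-side lemmas ------------------------------------------------------------------

theorem pvKey_inj (a b c d : Nat) : pvKey a b = pvKey c d ↔ a = c ∧ b = d := by
  simp [pvKey, Prod.ext_iff]

-- the loop on an empty stack returns the memo, whatever the fuel
theorem pvLoop_nil (matriz : List (List Int)) (f : Nat)
    (memo : PySem.Dict (Int × Int) (Int × Int)) : pvLoop matriz f memo [] = memo := by
  cases f <;> rfl

-- loop invariant: keys nodup, every stored pair is the DP value of its cell,
-- and every key is a cell of the cone below (N, M)
def pvInv (matriz : List (List Int)) (N M : Nat)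
    (memo : PySem.Dict (Int × Int) (Int × Int)) : Prop :=
  memo.keys.Nodup ∧
  (∀ a b : Nat, ∀ r, memo.get? (pvKey a b) = some r → r = pvDP (pvV matriz) a b) ∧
  (∀ key ∈ memo.keys, ∃ a b : Nat, a ≤ N ∧ b ≤ M ∧ key = pvKey a b)

-- all keys of the cone, as a list of length (N+1)*(M+1)
def pvGrid (N M : Nat) : List (Int × Int) :=
  (List.range (N + 1)).flatMap (fun a => (List.range (M + 1)).map (fun b => pvKey a b))

theorem pvGrid_length (N M : Nat) : (pvGrid N M).length = (N + 1) * (M + 1) := by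
  simp [pvGrid, List.length_flatMap]

theorem mem_pvGrid (N M a b : Nat) (ha : a ≤ N) (hb : b ≤ M) : pvKey a b ∈ pvGrid N M := by
  unfold pvGrid
  rw [List.mem_flatMap]
  exact ⟨a, by simp [List.mem_range]; omega, by rw [List.mem_map]; exact ⟨b, by simp [List.mem_range]; omega, rfl⟩⟩

theorem pvInv_size_le (matriz : List (List Int)) (N M : Nat)
    (memo : PySem.Dict (Int × Int) (Int × Int)) (h : pvInv matriz N M memo) :
    memo.size ≤ (N + 1) * (M + 1) := by
  obtain ⟨hnd, _, hdom⟩ := h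
  have hsub : memo.keys ⊆ pvGrid N M := by
    intro key hk
    obtain ⟨a, b, ha, hb, rfl⟩ := hdom key hk
    exact mem_pvGrid N M a b ha hb
  have hlen : memo.keys.length ≤ (pvGrid N M).length :=
    (List.subperm_of_subset hnd hsub).length_le
  rw [pvGrid_length] at hlen
  have hsz : memo.keys.length = memo.size := by
    simp [PySem.Dict.keys, PySem.Dict.size]
  omega

-- the compute branch returns the DP value when the needed predecessors are present
theorem pvResolve_eq (matriz : List (List Int))
    (memo : PySem.Dict (Int × Int) (Int × Int)) (i j : Nat)
    (hcorr : ∀ a b : Nat, ∀ r, memo.get? (pvKey a b) = some r → r = pvDP (pvV matriz) a b)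
    (hup : 0 < i → (memo.get? (pvKey (i - 1) j)).isSome = true)
    (hleft : 0 < j → (memo.get? (pvKey i (j - 1))).isSome = true) :
    pvResolve matriz memo i j = pvDP (pvV matriz) i j := by
  rcases i with _ | i' <;> rcases j with _ | j'
  · simp [pvResolve, pvDP, pvV]
  · obtain ⟨r, hr⟩ := Option.isSome_iff_exists.mp (hleft (Nat.succ_pos j'))
    simp only [Nat.add_sub_cancel] at hr
    have hD : (memo.getD (pvKey 0 (j' + 1 - 1)) (0, 0)) = pvDP (pvV matriz) 0 j' := by
      simp only [Nat.add_sub_cancel]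
      rw [PySem.Dict.getD_of_get?_eq_some _ _ hr, hcorr 0 j' r hr]
    have hni : ¬ ((0 : Nat) < 0) := by omega
    have hpj : (0 : Nat) < j' + 1 := Nat.succ_pos j'
    simp only [pvResolve, if_neg hni, if_pos hpj, hD, List.nil_append]
    simp only [PySem.List.min?_id_cons, PySem.List.max?_id_cons, List.foldl_nil,
      Option.getD_some]
    rw [if_neg (by simp)]
    simp only [pvDP, pvV, Prod.mk.injEq]
    constructor <;> ring
  · obtain ⟨r, hr⟩ := Option.isSome_iff_exists.mp (hup (Nat.succ_pos i'))
    simp only [Nat.add_sub_cancel] at hr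
    have hD : (memo.getD (pvKey (i' + 1 - 1) 0) (0, 0)) = pvDP (pvV matriz) i' 0 := by
      simp only [Nat.add_sub_cancel]
      rw [PySem.Dict.getD_of_get?_eq_some _ _ hr, hcorr i' 0 r hr]
    have hpi : (0 : Nat) < i' + 1 := Nat.succ_pos i'
    have hnj : ¬ ((0 : Nat) < 0) := by omega
    simp only [pvResolve, if_pos hpi, if_neg hnj, hD, List.append_nil]
    simp only [PySem.List.min?_id_cons, PySem.List.max?_id_cons, List.foldl_nil,
      Option.getD_some]
    rw [if_neg (by simp)]
    simp only [pvDP, pvV, Prod.mk.injEq]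
    constructor <;> ring
  · obtain ⟨ru, hru⟩ := Option.isSome_iff_exists.mp (hup (Nat.succ_pos i'))
    obtain ⟨rl, hrl⟩ := Option.isSome_iff_exists.mp (hleft (Nat.succ_pos j'))
    simp only [Nat.add_sub_cancel] at hru hrl
    have hDu : (memo.getD (pvKey (i' + 1 - 1) (j' + 1)) (0, 0))
        = pvDP (pvV matriz) i' (j' + 1) := by
      simp only [Nat.add_sub_cancel]
      rw [PySem.Dict.getD_of_get?_eq_some _ _ hru, hcorr i' (j' + 1) ru hru]
    have hDl : (memo.getD (pvKey (i' + 1) (j' + 1 - 1)) (0, 0))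
        = pvDP (pvV matriz) (i' + 1) j' := by
      simp only [Nat.add_sub_cancel]
      rw [PySem.Dict.getD_of_get?_eq_some _ _ hrl, hcorr (i' + 1) j' rl hrl]
    have h00 : ¬ (i' + 1 = 0 ∧ j' + 1 = 0) := by omega
    have hpi : (0 : Nat) < i' + 1 := Nat.succ_pos i'
    have hpj : (0 : Nat) < j' + 1 := Nat.succ_pos j'
    simp only [pvResolve, if_neg h00, if_pos hpi, if_pos hpj, hDu, hDl, List.cons_append,
      List.nil_append]
    simp only [PySem.List.min?_id_cons, PySem.List.max?_id_cons, List.foldl_cons,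
      List.foldl_nil, Option.getD_some]
    simp only [pvDP, pvV, Prod.mk.injEq]
    constructor <;> ring

-- what one resolved call guarantees: k loop steps turn memo into memo', the
-- target cell is stored with its DP value, every old entry survives, new keys
-- lie in the cone of (i, j), and k ≤ 3·(new cells) + 1
def pvGood (matriz : List (List Int)) (N M i j : Nat)
    (memo : PySem.Dict (Int × Int) (Int × Int)) (rest : List (Nat × Nat)) : Prop :=
  ∃ k memo',
    (∀ f, pvLoop matriz (k + f) memo ((i, j) :: rest) = pvLoop matriz f memo' rest) ∧
    pvInv matriz N M memo' ∧
    (∀ key r, memo.get? key = some r → memo'.get? key = some r) ∧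
    (∀ key, memo.get? key = none → memo'.get? key ≠ none →
      ∃ a b : Nat, a ≤ i ∧ b ≤ j ∧ key = pvKey a b) ∧
    memo'.get? (pvKey i j) = some (pvDP (pvV matriz) i j) ∧
    k + 3 * memo.size ≤ 3 * memo'.size + 1

-- case 1: the cell is already memoized — one pop step
theorem pvL_hit (matriz : List (List Int)) (N M i j : Nat)
    (memo : PySem.Dict (Int × Int) (Int × Int)) (rest : List (Nat × Nat))
    (hInv : pvInv matriz N M memo)
    (hc : memo.contains (pvKey i j) = true) :
    pvGood matriz N M i j memo rest := by
  have hsome : (memo.get? (pvKey i j)).isSome = true := by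
    rw [PySem.Dict.contains_eq_isSome_get?] at hc; exact hc
  obtain ⟨r, hr⟩ := Option.isSome_iff_exists.mp hsome
  have hrv := hInv.2.1 i j r hr
  refine ⟨1, memo, ?_, hInv, fun key r h => h, fun key h1 h2 => absurd h1 h2, by rw [hr, hrv],
    by omega⟩
  intro f
  have : 1 + f = f + 1 := by omega
  rw [this]
  simp [pvLoop, hc]

-- like pvGood, but with the tighter budget a compute step earns (k + 3·size + 2 ≤ 3·size')
def pvGoodS (matriz : List (List Int)) (N M i j : Nat)
    (memo : PySem.Dict (Int × Int) (Int × Int)) (rest : List (Nat × Nat)) : Prop :=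
  ∃ k memo',
    (∀ f, pvLoop matriz (k + f) memo ((i, j) :: rest) = pvLoop matriz f memo' rest) ∧
    pvInv matriz N M memo' ∧
    (∀ key r, memo.get? key = some r → memo'.get? key = some r) ∧
    (∀ key, memo.get? key = none → memo'.get? key ≠ none →
      ∃ a b : Nat, a ≤ i ∧ b ≤ j ∧ key = pvKey a b) ∧
    memo'.get? (pvKey i j) = some (pvDP (pvV matriz) i j) ∧
    k + 3 * memo.size + 2 ≤ 3 * memo'.size

theorem pvGood_of_strong (matriz : List (List Int)) (N M i j : Nat)
    (memo : PySem.Dict (Int × Int) (Int × Int)) (rest : List (Nat × Nat))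
    (h : pvGoodS matriz N M i j memo rest) : pvGood matriz N M i j memo rest := by
  obtain ⟨k, memo', h1, h2, h3, h4, h5, h6⟩ := h
  exact ⟨k, memo', h1, h2, h3, h4, h5, by omega⟩

-- case 2: the cell is unmemoized and has no missing predecessor — one compute step
theorem pvL_comp (matriz : List (List Int)) (N M i j : Nat)
    (memo : PySem.Dict (Int × Int) (Int × Int)) (rest : List (Nat × Nat))
    (hInv : pvInv matriz N M memo) (hiN : i ≤ N) (hjM : j ≤ M)
    (hc : memo.contains (pvKey i j) = false)
    (hp : pvPend memo i j = []) :
    pvGoodS matriz N M i j memo rest := by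
  obtain ⟨hnd, hcorr, hdom⟩ := hInv
  have hup : 0 < i → (memo.get? (pvKey (i - 1) j)).isSome = true := by
    intro hi
    rw [← PySem.Dict.contains_eq_isSome_get?]
    by_contra hcc
    have hcc' : memo.contains (pvKey (i - 1) j) = false := by
      cases h : memo.contains (pvKey (i - 1) j)
      · rfl
      · exact absurd h hcc
    have : pvPend memo i j ≠ [] := by
      simp only [pvPend, if_pos (And.intro hi hcc')]
      simp
    exact this hp
  have hleft : 0 < j → (memo.get? (pvKey i (j - 1))).isSome = true := by
    intro hj
    rw [← PySem.Dict.contains_eq_isSome_get?]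
    by_contra hcc
    have hcc' : memo.contains (pvKey i (j - 1)) = false := by
      cases h : memo.contains (pvKey i (j - 1))
      · rfl
      · exact absurd h hcc
    have : pvPend memo i j ≠ [] := by
      simp only [pvPend, if_pos (And.intro hj hcc')]
      simp
    exact this hp
  have hres : pvResolve matriz memo i j = pvDP (pvV matriz) i j :=
    pvResolve_eq matriz memo i j hcorr hup hleft
  have hnone : memo.get? (pvKey i j) = none :=
    (PySem.Dict.get?_eq_none_iff_contains memo _).mpr hc
  refine ⟨1, memo.insert (pvKey i j) (pvDP (pvV matriz) i j), ?_, ?_, ?_, ?_, ?_, ?_⟩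
  · intro f
    have : 1 + f = f + 1 := by omega
    rw [this]
    simp [pvLoop, hc, hp, hres]
  · refine ⟨PySem.Dict.nodup_keys_insert _ _ _ hnd, ?_, ?_⟩
    · intro a b r hget
      rw [PySem.Dict.get?_insert] at hget
      split_ifs at hget with hk
      · obtain ⟨ha, hb⟩ := (pvKey_inj a b i j).mp hk
        subst ha; subst hb
        exact (Option.some_inj.mp hget).symm
      · exact hcorr a b r hget
    · intro key hk
      rw [PySem.Dict.mem_keys_insert] at hk
      rcases hk with rfl | hk
      · exact ⟨i, j, hiN, hjM, rfl⟩
      · exact hdom key hk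
  · intro key r h
    rw [PySem.Dict.get?_insert]
    split_ifs with hk
    · subst hk; rw [hnone] at h; cases h
    · exact h
  · intro key h1 h2
    rw [PySem.Dict.get?_insert] at h2
    split_ifs at h2 with hk
    · exact ⟨i, j, le_refl i, le_refl j, hk⟩
    · exact absurd h1 h2
  · rw [PySem.Dict.get?_insert_self]
  · rw [PySem.Dict.size_insert, if_neg (by rw [hc]; simp)]
    omega

-- main lemma: processing any cell (i, j) of the cone succeeds within the budget
theorem pvL (matriz : List (List Int)) (N M : Nat) :
    ∀ (s i j : Nat), i + j ≤ s → i ≤ N → j ≤ M →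
    ∀ memo rest, pvInv matriz N M memo → pvGood matriz N M i j memo rest := by
  intro s
  induction s with
  | zero =>
    intro i j hs hiN hjM memo rest hInv
    have hi0 : i = 0 := by omega
    have hj0 : j = 0 := by omega
    subst hi0; subst hj0
    by_cases hc : memo.contains (pvKey 0 0) = true
    · exact pvL_hit matriz N M 0 0 memo rest hInv hc
    · have hc' : memo.contains (pvKey 0 0) = false := by
        cases h : memo.contains (pvKey 0 0)
        · rfl
        · exact absurd h hc
      exact pvGood_of_strong _ _ _ _ _ _ _ (pvL_comp matriz N M 0 0 memo rest hInv hiN hjM hc' (by simp [pvPend]))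
  | succ s ih =>
    intro i j hs hiN hjM memo rest hInv
    by_cases hc : memo.contains (pvKey i j) = true
    · exact pvL_hit matriz N M i j memo rest hInv hc
    · have hc' : memo.contains (pvKey i j) = false := by
        cases h : memo.contains (pvKey i j)
        · rfl
        · exact absurd h hc
      have hnone : memo.get? (pvKey i j) = none :=
        (PySem.Dict.get?_eq_none_iff_contains memo _).mpr hc'
      by_cases h1 : 0 < i ∧ memo.contains (pvKey (i - 1) j) = false
      · by_cases h2 : 0 < j ∧ memo.contains (pvKey i (j - 1)) = false
        · -- both predecessors missing: pend = [(i-1, j), (i, j-1)]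
          have hpend : pvPend memo i j = [(i - 1, j), (i, j - 1)] := by
            simp only [pvPend, if_pos h1, if_pos h2]; rfl
          obtain ⟨k2, memo2, heq2, hInv2, hext2, hnew2, hget2, hsz2⟩ :=
            ih i (j - 1) (by omega) hiN (by omega) memo ((i - 1, j) :: (i, j) :: rest) hInv
          obtain ⟨k1, memo3, heq1, hInv3, hext1, hnew1, hget1, hsz1⟩ :=
            ih (i - 1) j (by omega) (by omega) hjM memo2 ((i, j) :: rest) hInv2
          -- (i, j) is still unmemoized in memo3
          have hnone3 : memo3.get? (pvKey i j) = none := by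
            by_contra hnn
            by_cases h2n : memo2.get? (pvKey i j) = none
            · obtain ⟨a, b, ha, hb, hk⟩ := hnew1 _ h2n hnn
              obtain ⟨hia, hjb⟩ := (pvKey_inj i j a b).mp hk
              omega
            · obtain ⟨a, b, ha, hb, hk⟩ := hnew2 _ hnone h2n
              obtain ⟨hia, hjb⟩ := (pvKey_inj i j a b).mp hk
              omega
          have hc3 : memo3.contains (pvKey i j) = false :=
            (PySem.Dict.get?_eq_none_iff_contains memo3 _).mp hnone3
          have hup3 : memo3.get? (pvKey (i - 1) j) = some (pvDP (pvV matriz) (i - 1) j) := hget1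
          have hleft3 : memo3.get? (pvKey i (j - 1)) = some (pvDP (pvV matriz) i (j - 1)) :=
            hext1 _ _ hget2
          have hp3 : pvPend memo3 i j = [] := by
            have cu : memo3.contains (pvKey (i - 1) j) = true := by
              rw [PySem.Dict.contains_eq_isSome_get?, hup3]; rfl
            have cl : memo3.contains (pvKey i (j - 1)) = true := by
              rw [PySem.Dict.contains_eq_isSome_get?, hleft3]; rfl
            simp [pvPend, cu, cl]
          obtain ⟨kf, memo4, heqf, hInv4, hextf, hnewf, hgetf, hszf⟩ :=
            pvL_comp matriz N M i j memo3 rest hInv3 hiN hjM hc3 hp3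
          refine ⟨1 + k2 + k1 + kf, memo4, ?_, hInv4, ?_, ?_, hgetf, ?_⟩
          · intro f
            have e0 : 1 + k2 + k1 + kf + f = (k2 + (k1 + (kf + f))) + 1 := by omega
            rw [e0]
            have hstep : pvLoop matriz ((k2 + (k1 + (kf + f))) + 1) memo ((i, j) :: rest)
                = pvLoop matriz (k2 + (k1 + (kf + f))) memo
                    ((i, j - 1) :: (i - 1, j) :: (i, j) :: rest) := by
              simp [pvLoop, hc', hpend]
            rw [hstep, heq2 (k1 + (kf + f)), heq1 (kf + f), heqf f]
          · intro key r h
            exact hextf _ _ (hext1 _ _ (hext2 _ _ h))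
          · intro key hk1 hk2
            by_cases hA : memo2.get? key = none
            · by_cases hB : memo3.get? key = none
              · exact hnewf _ hB hk2
              · obtain ⟨a, b, ha, hb, rfl⟩ := hnew1 _ hA hB
                exact ⟨a, b, by omega, hb, rfl⟩
            · obtain ⟨a, b, ha, hb, rfl⟩ := hnew2 _ hk1 hA
              exact ⟨a, b, ha, by omega, rfl⟩
          · omega
        · -- only the upper predecessor is missing: pend = [(i-1, j)]
          have hpend : pvPend memo i j = [(i - 1, j)] := by
            simp only [pvPend, if_pos h1, if_neg h2]; rfl
          obtain ⟨k2, memo2, heq2, hInv2, hext2, hnew2, hget2, hsz2⟩ :=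
            ih (i - 1) j (by omega) (by omega) hjM memo ((i, j) :: rest) hInv
          have hnone2 : memo2.get? (pvKey i j) = none := by
            by_contra hnn
            obtain ⟨a, b, ha, hb, hk⟩ := hnew2 _ hnone hnn
            obtain ⟨hia, hjb⟩ := (pvKey_inj i j a b).mp hk
            omega
          have hc2 : memo2.contains (pvKey i j) = false :=
            (PySem.Dict.get?_eq_none_iff_contains memo2 _).mp hnone2
          have hp2 : pvPend memo2 i j = [] := by
            have cu : memo2.contains (pvKey (i - 1) j) = true := by
              rw [PySem.Dict.contains_eq_isSome_get?, hget2]; rfl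
            by_cases hj0 : 0 < j
            · have hl0 : memo.contains (pvKey i (j - 1)) = true := by
                by_contra hx
                exact h2 ⟨hj0, by simpa using hx⟩
              have hlsome : (memo.get? (pvKey i (j - 1))).isSome = true := by
                rw [PySem.Dict.contains_eq_isSome_get?] at hl0; exact hl0
              obtain ⟨r, hr⟩ := Option.isSome_iff_exists.mp hlsome
              have cl : memo2.contains (pvKey i (j - 1)) = true := by
                rw [PySem.Dict.contains_eq_isSome_get?, hext2 _ _ hr]; rfl
              simp [pvPend, cu, cl]
            · simp [pvPend, cu, hj0]
          obtain ⟨kf, memo3, heqf, hInv3, hextf, hnewf, hgetf, hszf⟩ :=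
            pvL_comp matriz N M i j memo2 rest hInv2 hiN hjM hc2 hp2
          refine ⟨1 + k2 + kf, memo3, ?_, hInv3, ?_, ?_, hgetf, ?_⟩
          · intro f
            have e0 : 1 + k2 + kf + f = (k2 + (kf + f)) + 1 := by omega
            rw [e0]
            have hstep : pvLoop matriz ((k2 + (kf + f)) + 1) memo ((i, j) :: rest)
                = pvLoop matriz (k2 + (kf + f)) memo ((i - 1, j) :: (i, j) :: rest) := by
              simp [pvLoop, hc', hpend]
            rw [hstep, heq2 (kf + f), heqf f]
          · intro key r h
            exact hextf _ _ (hext2 _ _ h)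
          · intro key hk1 hk2
            by_cases hA : memo2.get? key = none
            · exact hnewf _ hA hk2
            · obtain ⟨a, b, ha, hb, rfl⟩ := hnew2 _ hk1 hA
              exact ⟨a, b, by omega, hb, rfl⟩
          · omega
      · by_cases h2 : 0 < j ∧ memo.contains (pvKey i (j - 1)) = false
        · -- only the left predecessor is missing: pend = [(i, j-1)]
          have hpend : pvPend memo i j = [(i, j - 1)] := by
            simp only [pvPend, if_neg h1, if_pos h2]; rfl
          obtain ⟨k2, memo2, heq2, hInv2, hext2, hnew2, hget2, hsz2⟩ :=
            ih i (j - 1) (by omega) hiN (by omega) memo ((i, j) :: rest) hInv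
          have hnone2 : memo2.get? (pvKey i j) = none := by
            by_contra hnn
            obtain ⟨a, b, ha, hb, hk⟩ := hnew2 _ hnone hnn
            obtain ⟨hia, hjb⟩ := (pvKey_inj i j a b).mp hk
            omega
          have hc2 : memo2.contains (pvKey i j) = false :=
            (PySem.Dict.get?_eq_none_iff_contains memo2 _).mp hnone2
          have hp2 : pvPend memo2 i j = [] := by
            have cl : memo2.contains (pvKey i (j - 1)) = true := by
              rw [PySem.Dict.contains_eq_isSome_get?, hget2]; rfl
            by_cases hi0 : 0 < i
            · have hu0 : memo.contains (pvKey (i - 1) j) = true := by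
                by_contra hx
                exact h1 ⟨hi0, by simpa using hx⟩
              have husome : (memo.get? (pvKey (i - 1) j)).isSome = true := by
                rw [PySem.Dict.contains_eq_isSome_get?] at hu0; exact hu0
              obtain ⟨r, hr⟩ := Option.isSome_iff_exists.mp husome
              have cu : memo2.contains (pvKey (i - 1) j) = true := by
                rw [PySem.Dict.contains_eq_isSome_get?, hext2 _ _ hr]; rfl
              simp [pvPend, cu, cl]
            · simp [pvPend, cl, hi0]
          obtain ⟨kf, memo3, heqf, hInv3, hextf, hnewf, hgetf, hszf⟩ :=
            pvL_comp matriz N M i j memo2 rest hInv2 hiN hjM hc2 hp2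
          refine ⟨1 + k2 + kf, memo3, ?_, hInv3, ?_, ?_, hgetf, ?_⟩
          · intro f
            have e0 : 1 + k2 + kf + f = (k2 + (kf + f)) + 1 := by omega
            rw [e0]
            have hstep : pvLoop matriz ((k2 + (kf + f)) + 1) memo ((i, j) :: rest)
                = pvLoop matriz (k2 + (kf + f)) memo ((i, j - 1) :: (i, j) :: rest) := by
              simp [pvLoop, hc', hpend]
            rw [hstep, heq2 (kf + f), heqf f]
          · intro key r h
            exact hextf _ _ (hext2 _ _ h)
          · intro key hk1 hk2
            by_cases hA : memo2.get? key = none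
            · exact hnewf _ hA hk2
            · obtain ⟨a, b, ha, hb, rfl⟩ := hnew2 _ hk1 hA
              exact ⟨a, b, ha, by omega, rfl⟩
          · omega
        · -- no predecessor missing: one compute step
          exact pvGood_of_strong _ _ _ _ _ _ _ (pvL_comp matriz N M i j memo rest hInv hiN hjM hc' (by
            simp only [pvPend, if_neg h1, if_neg h2]; rfl))

-- B's result characterisation ----------------------------------------------------

theorem B_result (n m : Int) (matriz : List (List Int)) (hn : 1 ≤ n) (hm : 1 ≤ m)
    (hpar : PySem.Int.mod (n + m - 1) 2 = 0) :
    cambio_aulas_alt n m matriz =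
      if (pvDP (pvV matriz) (n.toNat - 1) (m.toNat - 1)).1 ≤ 0 ∧
         0 ≤ (pvDP (pvV matriz) (n.toNat - 1) (m.toNat - 1)).2
      then "YES" else "NO" := by
  unfold cambio_aulas_alt
  simp only [hpar, ne_eq, not_true_eq_false, if_false]
  have hInv0 : pvInv matriz (n - 1).toNat (m - 1).toNat PySem.Dict.empty := by
    refine ⟨PySem.Dict.nodup_keys_empty, ?_, ?_⟩
    · intro a b r h
      rw [PySem.Dict.get?_empty] at h
      cases h
    · intro key h
      rw [PySem.Dict.keys_empty] at h
      cases h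
  obtain ⟨k, memo', heq, hInv', _, _, hget, hsz⟩ :=
    pvL matriz (n - 1).toNat (m - 1).toNat ((n - 1).toNat + (m - 1).toNat)
      (n - 1).toNat (m - 1).toNat (le_refl _) (le_refl _) (le_refl _)
      PySem.Dict.empty [] hInv0
  have hbound := pvInv_size_le matriz (n - 1).toNat (m - 1).toNat memo' hInv'
  have hsz0 : (PySem.Dict.empty : PySem.Dict (Int × Int) (Int × Int)).size = 0 :=
    PySem.Dict.size_empty
  have hk : k ≤ 3 * (((n - 1).toNat + 1) * ((m - 1).toNat + 1)) + 1 := by omega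
  have hfuel : 3 * (((n - 1).toNat + 1) * ((m - 1).toNat + 1)) + 2
      = k + (3 * (((n - 1).toNat + 1) * ((m - 1).toNat + 1)) + 2 - k) := by omega
  rw [hfuel, heq _, pvLoop_nil]
  have hn1 : (n - 1).toNat = n.toNat - 1 := by omega
  have hm1 : (m - 1).toNat = m.toNat - 1 := by omega
  rw [hn1, hm1] at hget
  rcases hDP : pvDP (pvV matriz) (n.toNat - 1) (m.toNat - 1) with ⟨lo, hi⟩
  rw [hDP] at hget
  rw [hn1, hm1, hget]

-- ===== VERDICT (by name: the statement is the Claim_ definition above) =====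
theorem cambio_aulas_spec : Claim_equal_cambio_aulas := by
  intro n m matriz _hdom hpre
  unfold Spec_cambio_aulas
  by_cases hpar : PySem.Int.mod (n + m - 1) 2 ≠ 0
  · unfold cambio_aulas cambio_aulas_alt
    rw [if_pos hpar, if_pos hpar]
  · have hpar' : PySem.Int.mod (n + m - 1) 2 = 0 := by
      by_contra h; exact hpar h
    rcases hpre with h | ⟨hn, hm, _hlen, _hrows⟩
    · exact absurd h hpar
    · rw [A_result n m matriz hn hm hpar', B_result n m matriz hn hm hpar']
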